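-- pv_equiv track=rewrite | github.com/leeejihyun/algorithm | programmers/level1/모의고사.py | solution
-- ===== SOURCE A (Python) =====
-- def solution(answers):
--     person1 = [1, 2, 3, 4, 5]
--     person2 = [2, 1, 2, 3, 2, 4, 2, 5]
--     person3 = [3, 3, 1, 1, 2, 2, 4, 4, 5, 5]
--
--     count = []
--     for person in [person1, person2, person3]:
--         cnt = 0
--         j = 0
--         for i in range(len(answers)):
--             if person[j] == answers[i]:
--                 cnt += 1
--             j += 1
--             if j == len(person):
--                 j = 0
--         count.append(cnt)
--
--     max_cnt = max(count)
--     answer = [idx + 1 for idx, value in enumerate(count) if value == max_cnt]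
--
--     return sorted(answer)
-- ===== SOURCE B (Python) =====
-- def solution(answers):
--     patterns = [[1, 2, 3, 4, 5],
--                 [2, 1, 2, 3, 2, 4, 2, 5],
--                 [3, 3, 1, 1, 2, 2, 4, 4, 5, 5]]
--     # Histogram of answers keyed by (index mod 40, value); 40 = lcm(5, 8, 10),
--     # so every pattern is constant on each residue class mod 40.
--     hist = {}
--     for i, a in enumerate(answers):
--         key = (i % 40, a)
--         hist[key] = hist.get(key, 0) + 1
--     scores = []
--     for p in patterns:
--         s = 0
--         for r in range(40):
--             s += hist.get((r, p[r % len(p)]), 0)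
--         scores.append(s)
--     m = max(scores)
--     return [i + 1 for i, s in enumerate(scores) if s == m]
-- ===== Notes on version B (the rewrite author's own statement) =====
-- stated objective: alternative
-- what changed: A scans answers three times, once per pattern, advancing a manually wrapped cursor and comparing element by element, then picks winners with max/enumerate/sorted; B never compares answers against a pattern element-wise: it builds a histogram dict keyed by (index mod 40, value) in one pass (40 = lcm of the pattern lengths, so each pattern is constant on every residue class mod 40) and scores each pattern by 40 table lookups, emitting winner indices already in order without sorting.
import Mathlib
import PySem

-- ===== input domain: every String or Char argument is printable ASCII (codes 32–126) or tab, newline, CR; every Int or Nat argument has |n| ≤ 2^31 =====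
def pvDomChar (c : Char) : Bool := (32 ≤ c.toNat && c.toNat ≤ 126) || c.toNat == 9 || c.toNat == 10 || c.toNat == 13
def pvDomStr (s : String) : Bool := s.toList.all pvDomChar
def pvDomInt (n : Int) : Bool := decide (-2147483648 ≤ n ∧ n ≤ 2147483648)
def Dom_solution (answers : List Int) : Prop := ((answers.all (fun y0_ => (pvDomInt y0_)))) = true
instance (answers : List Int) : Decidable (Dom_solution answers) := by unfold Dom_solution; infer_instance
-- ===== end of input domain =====

-- B replaces A's three cursor-driven scans of answers by a histogram dict keyed by
-- (index mod 40, value) built in one pass (40 = lcm of the pattern lengths), scoring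
-- each fixed pattern by 40 table lookups and emitting winners in order without sorting.


-- ===== PORT A =====
-- inner 'for i in range(len(answers))' loop of A, state = (cnt, j)
def solution (answers : List Int) : List Int :=
  let person1 : List Int := [1, 2, 3, 4, 5]
  let person2 : List Int := [2, 1, 2, 3, 2, 4, 2, 5]
  let person3 : List Int := [3, 3, 1, 1, 2, 2, 4, 4, 5, 5]
  let count : List Int :=
    [person1, person2, person3].foldl (fun acc person =>
      let r :=
        (PySem.List.pyRange 0 (PySem.List.len answers) 1).foldl
          (fun (s : Int × Int) i =>
            let cnt := if PySem.List.pyGetD person s.2 0 = PySem.List.pyGetD answers i 0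
                       then s.1 + 1 else s.1
            let j := s.2 + 1
            (cnt, if j = PySem.List.len person then 0 else j))
          (0, 0)
      acc ++ [r.1]) []
  let max_cnt := (PySem.List.max? count (fun x => x)).getD 0
  let answer :=
    (PySem.List.enumerate count 0).foldl
      (fun acc p => if p.2 = max_cnt then acc ++ [p.1 + 1] else acc) []
  PySem.List.sorted answer (fun x => x) false

-- ===== PORT B =====
def solution_alt (answers : List Int) : List Int :=
  let patterns : List (List Int) := [[1, 2, 3, 4, 5], [2, 1, 2, 3, 2, 4, 2, 5], [3, 3, 1, 1, 2, 2, 4, 4, 5, 5]]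
  let hist : PySem.Dict (Int × Int) Int :=
    (PySem.List.enumerate answers 0).foldl
      (fun d q =>
        let key := (PySem.Int.mod q.1 40, q.2)
        d.insert key (d.getD key 0 + 1)) PySem.Dict.empty
  let scores : List Int :=
    patterns.foldl (fun acc p =>
      let s := (PySem.List.pyRange 0 40 1).foldl
        (fun (s : Int) r =>
          s + hist.getD (r, PySem.List.pyGetD p (PySem.Int.mod r (PySem.List.len p)) 0) 0) 0
      acc ++ [s]) []
  let m := (PySem.List.max? scores (fun x => x)).getD 0
  (PySem.List.enumerate scores 0).foldl
    (fun acc q => if q.2 = m then acc ++ [q.1 + 1] else acc) []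

-- ===== PRECONDITION & SPEC =====
def Spec_solution (answers : List Int) (out : List Int) : Prop := out = solution_alt answers
instance (answers : List Int) (out : List Int) : Decidable (Spec_solution answers out) := by unfold Spec_solution; infer_instance

-- ===== CLAIM (what is proved, stated in full; the proofs are below) =====
def Claim_equal_solution : Prop := ∀ (answers : List Int), Dom_solution answers → Spec_solution answers (solution answers)

-- ===== LEMMAS AND PROOFS =====

-- reference count: matches of pattern p against ans, starting at global index i
def cntSpec (p : List Int) : List Int → Nat → Int
  | [], _ => 0
  | a :: rest, i => (if p.getD (i % p.length) 0 = a then 1 else 0) + cntSpec p rest (i + 1)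

-- the (i mod 40, value) key list B's histogram counts, starting at global index i
def pairsFrom : List Int → Nat → List (Int × Int)
  | [], _ => []
  | a :: rest, i => (((i % 40 : Nat) : Int), a) :: pairsFrom rest (i + 1)

lemma loopA_eq (p : List Int) (hL : 0 < p.length) :
    ∀ (ans : List Int) (cnt : Int) (i : Nat),
      ans.foldl
        (fun (s : Int × Int) v =>
          let cnt := if PySem.List.pyGetD p s.2 0 = v then s.1 + 1 else s.1
          let j := s.2 + 1
          (cnt, if j = PySem.List.len p then 0 else j))
        (cnt, ((i % p.length : Nat) : Int))
      = (cnt + cntSpec p ans i, (((i + ans.length) % p.length : Nat) : Int)) := by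
  intro ans
  induction ans with
  | nil => intro cnt i; simp [cntSpec]
  | cons a rest ih =>
    intro cnt i
    have hmod : i % p.length < p.length := Nat.mod_lt _ hL
    have hj : (if ((i % p.length : Nat) : Int) + 1 = PySem.List.len p then 0
               else ((i % p.length : Nat) : Int) + 1)
             = (((i + 1) % p.length : Nat) : Int) := by
      simp only [PySem.List.len_eq]
      have hstep : (i + 1) % p.length = (i % p.length + 1) % p.length :=
        (Nat.mod_add_mod i p.length 1).symm
      by_cases h : i % p.length + 1 = p.length
      · have h0 : (i + 1) % p.length = 0 := by rw [hstep, h, Nat.mod_self]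
        rw [h0, if_pos (by exact_mod_cast h)]; simp
      · have h0 : (i + 1) % p.length = i % p.length + 1 := by
          rw [hstep]; exact Nat.mod_eq_of_lt (by omega)
        rw [h0, if_neg (by exact_mod_cast h)]; push_cast; ring
    simp only [List.foldl_cons, PySem.List.pyGetD_natCast, hj]
    rw [ih _ (i + 1)]
    simp only [cntSpec, Prod.mk.injEq, List.length_cons]
    have hshift : i + 1 + rest.length = i + (rest.length + 1) := by omega
    refine ⟨by split <;> omega, by rw [hshift]⟩

-- B's histogram-building loop produces exactly counter (pairsFrom answers 0)
lemma pairs_eq : ∀ (ans : List Int) (i : Nat),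
    (PySem.List.enumerate ans (i : Int)).map (fun q => (PySem.Int.mod q.1 40, q.2))
      = pairsFrom ans i := by
  intro ans
  induction ans with
  | nil => intro i; simp [PySem.List.enumerate_nil, pairsFrom]
  | cons a rest ih =>
    intro i
    have hm : PySem.Int.mod (i : Int) 40 = ((i % 40 : Nat) : Int) := by
      exact_mod_cast PySem.Int.mod_natCast i 40
    have hs : ((i : Int) + 1) = ((i + 1 : Nat) : Int) := by push_cast; ring
    simp only [PySem.List.enumerate_cons, List.map_cons, hm, hs, ih, pairsFrom]

lemma hist_eq (ans : List Int) :
    (PySem.List.enumerate ans 0).foldl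
      (fun (d : PySem.Dict (Int × Int) Int) q =>
        let key := (PySem.Int.mod q.1 40, q.2)
        d.insert key (d.getD key 0 + 1)) PySem.Dict.empty
    = PySem.Dict.counter (pairsFrom ans 0) := by
  have h0 : (0 : Int) = ((0 : Nat) : Int) := by norm_cast
  rw [← PySem.Dict.foldl_insert_getD_add_one_eq_counter, ← pairs_eq ans 0,
      List.foldl_map, ← h0]

-- each element of pairsFrom contributes to exactly one of the 40 residue buckets
lemma score_eq (p : List Int) (hd : p.length ∣ 40) :
    ∀ (ans : List Int) (i : Nat),
      (∑ r ∈ Finset.range 40,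
        ((pairsFrom ans i).count (((r : Nat) : Int), p.getD (r % p.length) 0) : Int))
      = cntSpec p ans i := by
  intro ans
  induction ans with
  | nil => intro i; simp [pairsFrom, cntSpec]
  | cons a rest ih =>
    intro i
    simp only [pairsFrom, List.count_cons, cntSpec, Nat.cast_add, Nat.cast_ite,
      Nat.cast_one, Nat.cast_zero]
    rw [Finset.sum_add_distrib, ih (i + 1)]
    have hsingle :
        (∑ r ∈ Finset.range 40,
          (if ((((i % 40 : Nat) : Int), a) == (((r : Nat) : Int), p.getD (r % p.length) 0)) = true
           then (1 : Int) else 0))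
        = (if p.getD (i % p.length) 0 = a then 1 else 0) := by
      rw [Finset.sum_eq_single_of_mem (i % 40) (Finset.mem_range.mpr (Nat.mod_lt _ (by omega)))]
      · have hmm : (i % 40) % p.length = i % p.length := Nat.mod_mod_of_dvd i hd
        simp only [hmm, beq_iff_eq, Prod.mk.injEq, true_and]
        exact if_congr eq_comm rfl rfl
      · intro b _ hb
        rw [if_neg]
        intro hcon
        rw [beq_iff_eq, Prod.mk.injEq] at hcon
        exact hb (Nat.cast_inj.mp hcon.1).symm
    rw [hsingle]; ring
lemma scoreB (p : List Int) (hd : p.length ∣ 40) (ans : List Int) :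
    (PySem.List.pyRange 0 40 1).foldl
      (fun (s : Int) r =>
        s + (PySem.Dict.counter (pairsFrom ans 0)).getD
              (r, PySem.List.pyGetD p (PySem.Int.mod r (PySem.List.len p)) 0) 0) 0
    = cntSpec p ans 0 := by
  have h40 : (40 : Int) = ((40 : Nat) : Int) := by norm_cast
  rw [h40, PySem.List.pyRange_zero_nat, List.foldl_map, PySem.List.foldl_add, zero_add]
  have hterm : ∀ r : Nat,
      (PySem.Dict.counter (pairsFrom ans 0)).getD
        (((r : Nat) : Int), PySem.List.pyGetD p (PySem.Int.mod (r : Int) (PySem.List.len p)) 0) 0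
      = ((pairsFrom ans 0).count (((r : Nat) : Int), p.getD (r % p.length) 0) : Int) := by
    intro r
    have hm : PySem.Int.mod (r : Int) (PySem.List.len p) = ((r % p.length : Nat) : Int) := by
      simp only [PySem.List.len_eq]
      exact_mod_cast PySem.Int.mod_natCast r p.length
    rw [hm, PySem.List.pyGetD_natCast, PySem.Dict.getD_counter]
  calc (List.map (fun r : Nat =>
          (PySem.Dict.counter (pairsFrom ans 0)).getD
            (((r : Nat) : Int), PySem.List.pyGetD p (PySem.Int.mod (r : Int) (PySem.List.len p)) 0) 0)
          (List.range 40)).sum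
      = (List.map (fun r : Nat =>
          ((pairsFrom ans 0).count (((r : Nat) : Int), p.getD (r % p.length) 0) : Int))
          (List.range 40)).sum := by
        rw [List.map_congr_left (fun r _ => hterm r)]
    _ = cntSpec p ans 0 := score_eq p hd ans 0

-- A sorts the already-increasing winner list; B leaves it as built
lemma tail_eq (x y z m : Int) :
    PySem.List.sorted
      ((PySem.List.enumerate ([x, y, z] : List Int) 0).foldl
        (fun acc p => if p.2 = m then acc ++ [p.1 + 1] else acc) [])
      (fun v => v) false
    = (PySem.List.enumerate ([x, y, z] : List Int) 0).foldl
        (fun acc p => if p.2 = m then acc ++ [p.1 + 1] else acc) [] := by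
  simp only [PySem.List.enumerate_cons, PySem.List.enumerate_nil, List.foldl_cons, List.foldl_nil]
  split_ifs <;> decide

-- ===== VERDICT (by name: the statement is the Claim_ definition above) =====
theorem solution_spec : Claim_equal_solution := by
  intro answers _
  unfold Spec_solution solution solution_alt
  simp only [List.foldl_cons, List.foldl_nil]
  have e1 : (List.foldl
      (fun (s : Int × Int) (i : Int) =>
        (if PySem.List.pyGetD [1, 2, 3, 4, 5] s.2 0 = PySem.List.pyGetD answers i 0 then s.1 + 1 else s.1,
         if s.2 + 1 = PySem.List.len ([1, 2, 3, 4, 5] : List Int) then 0 else s.2 + 1))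
      (0, 0) (PySem.List.pyRange 0 (PySem.List.len answers)))
      = (0 + cntSpec [1, 2, 3, 4, 5] answers 0, (((0 + answers.length) % 5 : Nat) : Int)) :=
    (PySem.List.foldl_pyRange_zero_pyGetD answers 0
      (fun (s : Int × Int) (v : Int) =>
        (if PySem.List.pyGetD [1, 2, 3, 4, 5] s.2 0 = v then s.1 + 1 else s.1,
         if s.2 + 1 = PySem.List.len ([1, 2, 3, 4, 5] : List Int) then 0 else s.2 + 1)) (0, 0)).trans
    (loopA_eq [1, 2, 3, 4, 5] (by decide) answers 0 0)
  have e2 : (List.foldl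
      (fun (s : Int × Int) (i : Int) =>
        (if PySem.List.pyGetD [2, 1, 2, 3, 2, 4, 2, 5] s.2 0 = PySem.List.pyGetD answers i 0 then s.1 + 1 else s.1,
         if s.2 + 1 = PySem.List.len ([2, 1, 2, 3, 2, 4, 2, 5] : List Int) then 0 else s.2 + 1))
      (0, 0) (PySem.List.pyRange 0 (PySem.List.len answers)))
      = (0 + cntSpec [2, 1, 2, 3, 2, 4, 2, 5] answers 0, (((0 + answers.length) % 8 : Nat) : Int)) :=
    (PySem.List.foldl_pyRange_zero_pyGetD answers 0
      (fun (s : Int × Int) (v : Int) =>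
        (if PySem.List.pyGetD [2, 1, 2, 3, 2, 4, 2, 5] s.2 0 = v then s.1 + 1 else s.1,
         if s.2 + 1 = PySem.List.len ([2, 1, 2, 3, 2, 4, 2, 5] : List Int) then 0 else s.2 + 1)) (0, 0)).trans
    (loopA_eq [2, 1, 2, 3, 2, 4, 2, 5] (by decide) answers 0 0)
  have e3 : (List.foldl
      (fun (s : Int × Int) (i : Int) =>
        (if PySem.List.pyGetD [3, 3, 1, 1, 2, 2, 4, 4, 5, 5] s.2 0 = PySem.List.pyGetD answers i 0 then s.1 + 1 else s.1,
         if s.2 + 1 = PySem.List.len ([3, 3, 1, 1, 2, 2, 4, 4, 5, 5] : List Int) then 0 else s.2 + 1))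
      (0, 0) (PySem.List.pyRange 0 (PySem.List.len answers)))
      = (0 + cntSpec [3, 3, 1, 1, 2, 2, 4, 4, 5, 5] answers 0, (((0 + answers.length) % 10 : Nat) : Int)) :=
    (PySem.List.foldl_pyRange_zero_pyGetD answers 0
      (fun (s : Int × Int) (v : Int) =>
        (if PySem.List.pyGetD [3, 3, 1, 1, 2, 2, 4, 4, 5, 5] s.2 0 = v then s.1 + 1 else s.1,
         if s.2 + 1 = PySem.List.len ([3, 3, 1, 1, 2, 2, 4, 4, 5, 5] : List Int) then 0 else s.2 + 1)) (0, 0)).trans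
    (loopA_eq [3, 3, 1, 1, 2, 2, 4, 4, 5, 5] (by decide) answers 0 0)
  simp only [e1, e2, e3, hist_eq answers,
    scoreB [1, 2, 3, 4, 5] (by decide) answers,
    scoreB [2, 1, 2, 3, 2, 4, 2, 5] (by decide) answers,
    scoreB [3, 3, 1, 1, 2, 2, 4, 4, 5, 5] (by decide) answers]
  simp only [List.nil_append, List.cons_append, zero_add]
  exact tail_eq _ _ _ _
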